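-- pv_equiv track=rewrite | github.com/VincentHwuang/Robust-PPDA | Utility.py | extract_boolean_shares
-- ===== SOURCE A (Python) =====
-- from typing import List, Tuple, Dict
--
-- def extract_boolean_shares(value : int, ring_size : int) -> List[int]:
--     assert value <= (pow(2, ring_size) - 1)
--     boolean_shares = ''
--     for i in range(ring_size):
--         x_i = value & 1
--         value >>= 1
--         boolean_shares = boolean_shares + str(x_i)
--
--     return boolean_shares
-- ===== SOURCE B (Python) =====
-- def extract_boolean_shares(value : int, ring_size : int):
--     assert value <= (pow(2, ring_size) - 1)
--     return bin(value % (1 << ring_size))[2:].zfill(ring_size)[::-1][:ring_size]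
-- ===== Notes on version B (the rewrite author's own statement) =====
-- stated objective: faster
-- what changed: Replaces the per-bit mask/shift loop with string concatenation by a closed-form one-liner: reduce value mod 2**ring_size, format with bin(), zero-fill to width, reverse; same assert kept.
-- outside the precondition, e.g. on extract_boolean_shares(-1, -2): A returns '', B raises ValueError
import Mathlib
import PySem

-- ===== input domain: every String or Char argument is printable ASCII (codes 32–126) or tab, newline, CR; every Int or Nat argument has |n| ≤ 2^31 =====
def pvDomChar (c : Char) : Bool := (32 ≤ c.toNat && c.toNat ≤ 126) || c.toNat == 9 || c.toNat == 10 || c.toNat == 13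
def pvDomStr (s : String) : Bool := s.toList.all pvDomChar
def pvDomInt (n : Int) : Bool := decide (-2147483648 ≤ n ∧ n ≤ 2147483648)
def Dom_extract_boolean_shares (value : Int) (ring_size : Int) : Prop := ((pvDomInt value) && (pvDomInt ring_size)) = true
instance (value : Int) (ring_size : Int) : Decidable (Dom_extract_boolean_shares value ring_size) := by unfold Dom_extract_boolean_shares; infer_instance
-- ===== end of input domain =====

-- B replaces A's per-bit shift loop by a closed-form conversion (value mod 2^ring_size → binary digits → zero-fill → reverse); same return value, no mutation on either side.

-- ===== PORT A =====
-- body of 'for i in range(ring_size)': state = (value, boolean_shares)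
def pvLoopA (st : Int × List Char) (_i : Int) : Int × List Char :=
  let x_i := PySem.Int.band st.1 1                       -- x_i = value & 1
  let value' := st.1 >>> (1 : Nat)                       -- value >>= 1
  (value', st.2 ++ PySem.Int.toChars x_i)                -- boolean_shares = boolean_shares + str(x_i)

def extract_boolean_shares (value : Int) (ring_size : Int) : String :=
  String.ofList ((PySem.List.pyRange 0 ring_size 1).foldl pvLoopA (value, [])).2

-- ===== PORT B =====
-- hand port of bin(m)[2:] for m ≥ 0 (exact there): LSB-first digits by repeated halving
-- (structural fuel = m, enough since m halves each step), reversed to MSB-first; '0' for m = 0.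
def pvBinGo : Nat → Nat → List Char
  | 0, _ => []
  | _ + 1, 0 => []
  | fuel + 1, m + 1 => (if (m + 1) % 2 = 1 then '1' else '0') :: pvBinGo fuel ((m + 1) / 2)

def pvBinStr (m : Nat) : List Char := if m = 0 then ['0'] else (pvBinGo m m).reverse

-- s.zfill(n): pad with '0' on the left to length n
def pvZfill (s : List Char) (n : Nat) : List Char := List.replicate (n - s.length) '0' ++ s

def extract_boolean_shares_alt (value : Int) (ring_size : Int) : String :=
  -- bin(value % (1 << ring_size))[2:].zfill(ring_size)[::-1][:ring_size]
  -- [::-1] is reverse (PySem.List.slice?_none_none_neg_one); [:ring_size] is take (PySem.List.slice_to_natCast)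
  String.ofList
    ((pvZfill (pvBinStr (PySem.Int.mod value ((1 : Int) <<< ring_size.toNat)).toNat)
        ring_size.toNat).reverse.take ring_size.toNat)

-- ===== PRECONDITION & SPEC =====
-- Pre_ excludes (a) inputs failing A's assert (AssertionError in both programs) and (b) negative
-- ring_size: there A's 'pow(2, ring_size)' is a float, so the assert accidentally passes for
-- negative value and A returns '', while B's integer shift '1 << ring_size' raises ValueError.
def Pre_extract_boolean_shares (value : Int) (ring_size : Int) : Prop :=
  0 ≤ ring_size ∧ value ≤ 2 ^ ring_size.toNat - 1
instance (value : Int) (ring_size : Int) : Decidable (Pre_extract_boolean_shares value ring_size) := by unfold Pre_extract_boolean_shares; infer_instance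
def pvWitness_extract_boolean_shares : Int × Int := (5, 4)

def Spec_extract_boolean_shares (value : Int) (ring_size : Int) (out : String) : Prop := out = extract_boolean_shares_alt value ring_size
instance (value : Int) (ring_size : Int) (out : String) : Decidable (Spec_extract_boolean_shares value ring_size out) := by unfold Spec_extract_boolean_shares; infer_instance

-- ===== CLAIM (what is proved, stated in full; the proofs are below) =====
def Claim_equal_extract_boolean_shares : Prop := ∀ (value : Int) (ring_size : Int), Dom_extract_boolean_shares value ring_size → Pre_extract_boolean_shares value ring_size → Spec_extract_boolean_shares value ring_size (extract_boolean_shares value ring_size)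

-- ===== LEMMAS AND PROOFS =====

-- the common reference value: the n LSB-first bit characters of v
def pvBitc (v : Int) : Char := if PySem.Int.mod v 2 = 1 then '1' else '0'

def pvBits : Int → Nat → List Char
  | _, 0 => []
  | v, n + 1 => pvBitc v :: pvBits (v >>> (1 : Nat)) n

theorem pvBits_length (v : Int) (n : Nat) : (pvBits v n).length = n := by
  induction n generalizing v with
  | zero => rfl
  | succ n ih => simp [pvBits, ih]

theorem pv_shiftRight_one (v : Int) : v >>> (1 : Nat) = v / 2 := by
  rw [Int.shiftRight_eq_div_pow]; norm_num

theorem pv_toChars_band_one (v : Int) : PySem.Int.toChars (PySem.Int.band v 1) = [pvBitc v] := by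
  rw [PySem.Int.band_one]; unfold pvBitc
  rcases PySem.Int.mod_two_eq v with h | h <;> rw [h] <;> decide

theorem pv_loopA_spec (l : List Int) : ∀ (v : Int) (acc : List Char),
    (l.foldl pvLoopA (v, acc)).2 = acc ++ pvBits v l.length := by
  induction l with
  | nil => intro v acc; simp [pvBits]
  | cons a l ih =>
      intro v acc
      simp only [List.foldl_cons, List.length_cons, pvBits]
      rw [show pvLoopA (v, acc) a = (v >>> (1 : Nat), acc ++ [pvBitc v]) by
        simp [pvLoopA, pv_toChars_band_one]]
      rw [ih]; simp

theorem pv_A_eq (value ring_size : Int) :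
    extract_boolean_shares value ring_size = String.ofList (pvBits value ring_size.toNat) := by
  unfold extract_boolean_shares
  rw [pv_loopA_spec, PySem.List.length_pyRange_one]
  simp

theorem pvBits_zero (n : Nat) : pvBits 0 n = List.replicate n '0' := by
  induction n with
  | zero => rfl
  | succ n ih =>
      rw [pvBits, pv_shiftRight_one, show (0 : Int) / 2 = 0 by norm_num, ih,
        List.replicate_succ]
      congr 1

theorem pvBinGo_congr : ∀ (fuel : Nat), ∀ {m fuel' : Nat}, m ≤ fuel → m ≤ fuel' →
    pvBinGo fuel m = pvBinGo fuel' m := by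
  intro fuel
  induction fuel with
  | zero =>
      intro m fuel' h _
      have : m = 0 := by omega
      subst this
      cases fuel' <;> rfl
  | succ fuel ih =>
      intro m fuel' h h'
      cases m with
      | zero => cases fuel' <;> rfl
      | succ k =>
          cases fuel' with
          | zero => omega
          | succ f' =>
              simp only [pvBinGo]
              congr 1
              exact ih (by omega) (by omega)

theorem pvBinGo_succ (k : Nat) :
    pvBinGo (k + 1) (k + 1)
      = (if (k + 1) % 2 = 1 then '1' else '0') :: pvBinGo ((k + 1) / 2) ((k + 1) / 2) := by
  simp only [pvBinGo]
  congr 1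
  exact pvBinGo_congr k (by omega) (by omega)

theorem pvBits_natCast (n : Nat) : ∀ M : Nat, M < 2 ^ n →
    pvBits (M : Int) n = pvBinGo M M ++ List.replicate (n - (pvBinGo M M).length) '0' := by
  induction n with
  | zero =>
      intro M hM
      have : M = 0 := by simpa [Nat.lt_one_iff] using hM
      subst this; rfl
  | succ n ih =>
      intro M hM
      cases M with
      | zero => simpa [pvBinGo] using pvBits_zero (n + 1)
      | succ k =>
          rw [pvBinGo_succ]
          have hdiv : (k + 1) / 2 < 2 ^ n := by
            rw [Nat.div_lt_iff_lt_mul (by norm_num)]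
            calc k + 1 < 2 ^ (n + 1) := hM
            _ = 2 ^ n * 2 := by ring
          have hcast : (((k + 1 : Nat) : Int)) >>> (1 : Nat) = (((k + 1) / 2 : Nat) : Int) := by
            rw [pv_shiftRight_one]; omega
          have hbitc : pvBitc ((k + 1 : Nat) : Int) = (if (k + 1) % 2 = 1 then '1' else '0') := by
            have h2 : PySem.Int.mod ((k + 1 : Nat) : Int) 2 = (((k + 1) % 2 : Nat) : Int) := by
              exact_mod_cast PySem.Int.mod_natCast (k + 1) 2
            unfold pvBitc
            rw [h2]
            by_cases hm : (k + 1) % 2 = 1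
            · simp [hm]
            · rw [if_neg hm, if_neg (by omega : ¬(((k + 1) % 2 : Nat) : Int) = 1)]
          rw [pvBits, hcast, hbitc, ih ((k + 1) / 2) hdiv]
          have hlen : (n + 1) - ((pvBinGo ((k + 1) / 2) ((k + 1) / 2)).length + 1)
              = n - (pvBinGo ((k + 1) / 2) ((k + 1) / 2)).length := by omega
          simp [hlen]

theorem pvBinGo_len_le (n M : Nat) (hM : M < 2 ^ n) : (pvBinGo M M).length ≤ n := by
  have h := congrArg List.length (pvBits_natCast n M hM)
  rw [pvBits_length] at h
  simp at h
  omega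

theorem pv_one_shiftLeft (n : Nat) : (1 : Int) <<< n = 2 ^ n := by
  simp [Int.shiftLeft_eq]

theorem pv_B_eq (value ring_size : Int) :
    extract_boolean_shares_alt value ring_size
      = String.ofList (pvBits (PySem.Int.mod value (2 ^ ring_size.toNat)) ring_size.toNat) := by
  unfold extract_boolean_shares_alt pvBinStr pvZfill
  rw [pv_one_shiftLeft]
  set n := ring_size.toNat with hn
  have hPpos : (0 : Int) < 2 ^ n := by positivity
  set m := PySem.Int.mod value (2 ^ n) with hm
  have hm0 : 0 ≤ m := PySem.Int.mod_nonneg _ hPpos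
  have hmlt : m < 2 ^ n := PySem.Int.mod_lt _ hPpos
  have hMcast : ((m.toNat : Int)) = m := Int.toNat_of_nonneg hm0
  have hMlt : m.toNat < 2 ^ n := by
    have h1 : ((m.toNat : Int)) < ((2 ^ n : Nat) : Int) := by push_cast; rw [hMcast]; exact hmlt
    exact_mod_cast h1
  by_cases h0 : m.toNat = 0
  · have hm00 : m = 0 := by omega
    rw [if_pos h0, hm00, pvBits_zero]
    rcases Nat.eq_zero_or_pos n with hn0 | hnpos
    · simp [hn0]
    · congr 1
      rw [List.reverse_append, List.reverse_replicate]
      simp only [List.reverse_cons, List.reverse_nil, List.nil_append, List.singleton_append,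
        List.length_cons, List.length_nil]
      rw [show '0' :: List.replicate (n - 1) '0' = List.replicate n '0' by
        rw [← List.replicate_succ]; congr 1; omega]
      exact List.take_of_length_le (by simp)
  · rw [if_neg h0, ← hMcast]
    simp only [Int.toNat_natCast]
    rw [pvBits_natCast n m.toNat hMlt]
    have hlen := pvBinGo_len_le n m.toNat hMlt
    congr 1
    rw [List.length_reverse, List.reverse_append, List.reverse_reverse, List.reverse_replicate]
    exact List.take_of_length_le (by rw [List.length_append, List.length_replicate]; omega)

theorem pv_mod_half (v K : Int) : (v % (2 * K)) / 2 = (v / 2) % K := by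
  have h2 : (v - 2 * K * (v / (2 * K))) / 2 = v / 2 - K * (v / (2 * K)) := by
    have h := Int.add_mul_ediv_right v (-(K * (v / (2 * K)))) (by norm_num : (2 : Int) ≠ 0)
    rw [show v - 2 * K * (v / (2 * K)) = v + -(K * (v / (2 * K))) * 2 by ring, h]; ring
  rw [Int.emod_def v (2 * K), h2, Int.emod_def, Int.ediv_ediv_of_nonneg (by norm_num : (0 : Int) ≤ 2)]

theorem pvBits_mod (n : Nat) : ∀ v : Int, pvBits (PySem.Int.mod v (2 ^ n)) n = pvBits v n := by
  induction n with
  | zero => intro v; rfl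
  | succ n ih =>
      intro v
      have hPpos : (0 : Int) < 2 ^ n := by positivity
      have hP1pos : (0 : Int) < 2 ^ (n + 1) := by positivity
      rw [PySem.Int.mod_eq_emod_of_pos hP1pos]
      have h2P : (2 : Int) ^ (n + 1) = 2 * 2 ^ n := by ring
      have hhead : pvBitc (v % 2 ^ (n + 1)) = pvBitc v := by
        unfold pvBitc
        rw [PySem.Int.mod_eq_emod_of_pos (by norm_num : (0 : Int) < 2),
          PySem.Int.mod_eq_emod_of_pos (by norm_num : (0 : Int) < 2),
          h2P, Int.emod_emod_of_dvd v ⟨2 ^ n, by ring⟩]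
      have htail : pvBits ((v % 2 ^ (n + 1)) >>> (1 : Nat)) n = pvBits (v >>> (1 : Nat)) n := by
        rw [pv_shiftRight_one, pv_shiftRight_one, h2P, pv_mod_half]
        have h := ih (v / 2)
        rw [PySem.Int.mod_eq_emod_of_pos hPpos] at h
        exact h
      rw [pvBits, pvBits, hhead, htail]

-- ===== VERDICT (by name: the statement is the Claim_ definition above) =====
theorem extract_boolean_shares_spec : Claim_equal_extract_boolean_shares := by
  intro value ring_size _hdom _hpre
  unfold Spec_extract_boolean_shares
  rw [pv_A_eq, pv_B_eq, pvBits_mod]
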